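-- pv_equiv track=rewrite | github.com/dbmcco/driftdriver | driftdriver/cli.py | _ordered_optional_plugins
-- ===== SOURCE A (Python) =====
-- OPTIONAL_PLUGINS = [
--     "specdrift",
--     "datadrift",
--     "archdrift",
--     "depsdrift",
--     "uxdrift",
--     "therapydrift",
--     "fixdrift",
--     "yagnidrift",
--     "redrift",
-- ]
--
-- def _ordered_optional_plugins(policy_order: list[str]) -> list[str]:
--     ordered: list[str] = []
--     seen: set[str] = set()
--     for raw in policy_order:
--         plugin = str(raw or "").strip()
--         if plugin in OPTIONAL_PLUGINS and plugin not in seen: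
--             ordered.append(plugin)
--             seen.add(plugin)
--     for plugin in OPTIONAL_PLUGINS:
--         if plugin not in seen:
--             ordered.append(plugin)
--     return ordered
-- ===== SOURCE B (Python) =====
-- OPTIONAL_PLUGINS = [
--     "specdrift",
--     "datadrift",
--     "archdrift",
--     "depsdrift",
--     "uxdrift",
--     "therapydrift",
--     "fixdrift",
--     "yagnidrift",
--     "redrift",
-- ]
--
-- def _ordered_optional_plugins(policy_order: list[str]) -> list[str]:
--     rank: dict[str, int] = {}
--     for raw in policy_order:
--         plugin = str(raw or "").strip()
--         if plugin in OPTIONAL_PLUGINS and plugin not in rank: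
--             rank[plugin] = len(rank)
--     n = len(OPTIONAL_PLUGINS)
--     return sorted(
--         OPTIONAL_PLUGINS,
--         key=lambda p: rank.get(p, n + OPTIONAL_PLUGINS.index(p)),
--     )
-- ===== Notes on version B (the rewrite author's own statement) =====
-- stated objective: alternative
-- what changed: Replaces A's two passes (filter-dedup-append then scan-for-missing) by building a first-occurrence rank table over the policy list and returning one stable sort of OPTIONAL_PLUGINS keyed by that rank, with absent plugins keyed past the table by their canonical index.
import Mathlib
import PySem

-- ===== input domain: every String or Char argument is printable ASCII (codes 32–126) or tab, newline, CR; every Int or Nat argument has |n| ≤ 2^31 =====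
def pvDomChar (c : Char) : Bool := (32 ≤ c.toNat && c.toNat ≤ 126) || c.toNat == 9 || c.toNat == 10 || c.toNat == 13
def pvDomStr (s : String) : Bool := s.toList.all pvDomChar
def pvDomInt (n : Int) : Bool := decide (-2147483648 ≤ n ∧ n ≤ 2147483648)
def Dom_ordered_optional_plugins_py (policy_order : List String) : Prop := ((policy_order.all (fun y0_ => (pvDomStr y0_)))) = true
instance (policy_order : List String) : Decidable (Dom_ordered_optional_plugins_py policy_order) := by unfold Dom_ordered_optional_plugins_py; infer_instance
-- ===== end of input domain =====

-- B replaces A's two filter/append passes by a first-occurrence rank table plus one stable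
-- sort of the canonical plugin list (objective: alternative decomposition, same cost class).

-- ===== PORT A =====
-- module constant OPTIONAL_PLUGINS
def pvOPT : List String :=
  ["specdrift", "datadrift", "archdrift", "depsdrift", "uxdrift",
   "therapydrift", "fixdrift", "yagnidrift", "redrift"]

-- str(raw or "").strip()  (raw is a str: 'raw or ""' is raw unless raw == "")
def pvClean (raw : String) : String :=
  PySem.Str.strip (if raw = "" then "" else raw)

-- body of A's first loop
def pvStepA (st : List String × PySem.Set String) (raw : String) :
    List String × PySem.Set String :=
  let plugin := pvClean raw
  if pvOPT.contains plugin && !(PySem.Set.contains st.2 plugin) then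
    (st.1 ++ [plugin], PySem.Set.add st.2 plugin)
  else st

def ordered_optional_plugins_py (policy_order : List String) : List String :=
  let st := policy_order.foldl pvStepA ([], PySem.Set.empty)
  pvOPT.foldl
    (fun ordered plugin =>
      if !(PySem.Set.contains st.2 plugin) then ordered ++ [plugin] else ordered)
    st.1

-- ===== PORT B =====
-- body of B's loop: rank[plugin] = len(rank) on first qualifying occurrence
def pvStepB (rank : PySem.Dict String Int) (raw : String) : PySem.Dict String Int :=
  let plugin := pvClean raw
  if pvOPT.contains plugin && !(rank.contains plugin) then
    rank.insert plugin (rank.size : Int)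
  else rank

def ordered_optional_plugins_py_alt (policy_order : List String) : List String :=
  let rank := policy_order.foldl pvStepB PySem.Dict.empty
  let n : Int := (pvOPT.length : Int)
  -- key=lambda p: rank.get(p, n + OPTIONAL_PLUGINS.index(p)); p is always drawn from
  -- OPTIONAL_PLUGINS, so .index(p) never raises; '.getD 0' is the unreachable none arm
  PySem.List.sorted pvOPT
    (fun p => rank.getD p (n + (((PySem.List.index? pvOPT p).getD 0 : Nat) : Int))) false

-- ===== PRECONDITION & SPEC =====
def Spec_ordered_optional_plugins_py (policy_order : List String) (out : List String) : Prop := out = ordered_optional_plugins_py_alt policy_order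
instance (policy_order : List String) (out : List String) : Decidable (Spec_ordered_optional_plugins_py policy_order out) := by unfold Spec_ordered_optional_plugins_py; infer_instance

-- ===== CLAIM (what is proved, stated in full; the proofs are below) =====
def Claim_equal_ordered_optional_plugins_py : Prop := ∀ (policy_order : List String), Dom_ordered_optional_plugins_py policy_order → Spec_ordered_optional_plugins_py policy_order (ordered_optional_plugins_py policy_order)

-- ===== LEMMAS AND PROOFS =====

-- the rank dict built after o has been collected: o[j] ↦ i + j
def pvRankPairs : List String → Int → List (String × Int)
  | [], _ => []
  | p :: t, i => (p, i) :: pvRankPairs t (i + 1)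

theorem pvRankPairs_length (l : List String) (i : Int) :
    (pvRankPairs l i).length = l.length := by
  induction l generalizing i with
  | nil => rfl
  | cons p t ih => simp [pvRankPairs, ih]

theorem pvRankPairs_append (l : List String) (p : String) (i : Int) :
    pvRankPairs (l ++ [p]) i = pvRankPairs l i ++ [(p, i + l.length)] := by
  induction l generalizing i with
  | nil => simp [pvRankPairs]
  | cons q t ih =>
      have hc : i + 1 + (t.length : Int) = i + ((t.length : Nat) + 1 : Nat) := by
        push_cast; ring
      simp only [List.cons_append, pvRankPairs, ih, List.length_cons, hc]

theorem pv_get?_none (l : List String) (i : Int) (p : String) (h : p ∉ l) :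
    (PySem.Dict.mk (pvRankPairs l i)).get? p = none := by
  induction l generalizing i with
  | nil => rfl
  | cons q t ih =>
      have hq : ¬ q = p := fun e => h (e ▸ List.mem_cons_self)
      rw [pvRankPairs, PySem.Dict.get?_mk_cons]
      simp only [beq_iff_eq, if_neg hq]
      exact ih (i + 1) (fun hm => h (List.mem_cons_of_mem _ hm))

theorem pv_get?_mem (l : List String) (i : Int) (p : String) (h : p ∈ l) :
    ∃ k : Int, (PySem.Dict.mk (pvRankPairs l i)).get? p = some k
      ∧ i ≤ k ∧ k < i + l.length := by
  induction l generalizing i with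
  | nil => cases h
  | cons q t ih =>
      rw [pvRankPairs, PySem.Dict.get?_mk_cons]
      by_cases hq : q = p
      · refine ⟨i, by simp [hq], le_refl i, ?_⟩
        simp only [List.length_cons]
        push_cast; omega
      · have hpt : p ∈ t := by
          rcases List.mem_cons.mp h with e | e
          · exact absurd e.symm hq
          · exact e
        obtain ⟨k, hk, h1, h2⟩ := ih (i + 1) hpt
        refine ⟨k, ?_, by omega, ?_⟩
        · simp only [beq_iff_eq, if_neg hq]; exact hk
        · simp only [List.length_cons] at *
          push_cast at h2 ⊢; omega

theorem pv_getD_cons_ne (q : String) (t : List String) (i : Int) (p : String) (d : Int)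
    (h : ¬ q = p) :
    (PySem.Dict.mk (pvRankPairs (q :: t) i)).getD p d
      = (PySem.Dict.mk (pvRankPairs t (i + 1))).getD p d := by
  simp only [PySem.Dict.getD, pvRankPairs, PySem.Dict.get?_mk_cons, beq_iff_eq, if_neg h]

theorem pv_contains_rank (l : List String) (i : Int) (p : String) :
    (PySem.Dict.mk (pvRankPairs l i)).contains p = l.contains p := by
  rw [PySem.Dict.contains_eq_isSome_get?]
  by_cases h : p ∈ l
  · obtain ⟨k, hk, -, -⟩ := pv_get?_mem l i p h
    simp [hk, h]
  · simp [pv_get?_none l i p h, h]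

theorem pv_size_rank (l : List String) :
    (PySem.Dict.mk (pvRankPairs l 0)).size = l.length := by
  simp [PySem.Dict.size, pvRankPairs_length]

theorem pv_insert_rank (l : List String) (p : String) (h : p ∉ l) :
    (PySem.Dict.mk (pvRankPairs l 0)).insert p (l.length : Int)
      = PySem.Dict.mk (pvRankPairs (l ++ [p]) 0) := by
  have hc : (PySem.Dict.mk (pvRankPairs l 0)).contains p = false := by
    rw [pv_contains_rank]
    simpa using h
  apply PySem.Dict.ext
  rw [PySem.Dict.items_insert_of_not_contains _ _ hc]
  simp [pvRankPairs_append]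

-- pairwise strict growth of the stored ranks along a duplicate-free l, any per-element defaults
theorem pv_pairwise_rank (l : List String) (i : Int) (f g : String → Int) (hn : l.Nodup) :
    l.Pairwise (fun a b =>
      (PySem.Dict.mk (pvRankPairs l i)).getD a (f a)
        < (PySem.Dict.mk (pvRankPairs l i)).getD b (g b)) := by
  induction l generalizing i with
  | nil => exact List.Pairwise.nil
  | cons q t ih =>
      have hqt : q ∉ t := (List.nodup_cons.mp hn).1
      refine List.Pairwise.cons ?_ ?_
      · intro b hb
        have hbq : ¬ q = b := fun e => hqt (e ▸ hb)
        have hhead : (PySem.Dict.mk (pvRankPairs (q :: t) i)).getD q (f q) = i := by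
          simp [PySem.Dict.getD, pvRankPairs, PySem.Dict.get?_mk_cons]
        obtain ⟨k, hk, h1, -⟩ := pv_get?_mem t (i + 1) b hb
        rw [hhead, pv_getD_cons_ne q t i b (g b) hbq]
        simp only [PySem.Dict.getD, hk, Option.getD_some]
        omega
      · exact List.Pairwise.imp_of_mem
          (fun {a b} ha hb hr => by
            rw [pv_getD_cons_ne q t i a (f a) (fun e => hqt (e ▸ ha)),
              pv_getD_cons_ne q t i b (g b) (fun e => hqt (e ▸ hb))]
            exact hr)
          (ih (i + 1) (List.nodup_cons.mp hn).2)

-- B's sort key over the final rank table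
def pvKey (o : List String) (p : String) : Int :=
  (PySem.Dict.mk (pvRankPairs o 0)).getD p
    ((pvOPT.length : Int) + (((PySem.List.index? pvOPT p).getD 0 : Nat) : Int))

theorem pv_key_not_mem (o : List String) (p : String) (h : p ∉ o) :
    pvKey o p = (pvOPT.length : Int) + (((PySem.List.index? pvOPT p).getD 0 : Nat) : Int) := by
  simp [pvKey, PySem.Dict.getD, pv_get?_none o 0 p h]

theorem pv_length_le (o : List String) (hn : o.Nodup) (hs : o ⊆ pvOPT) :
    o.length ≤ pvOPT.length := by
  have h1 : o.toFinset.card = o.length := List.toFinset_card_of_nodup hn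
  have h2 : o.toFinset ⊆ pvOPT.toFinset := by
    intro x hx
    simp only [List.mem_toFinset] at hx ⊢
    exact hs hx
  calc o.length = o.toFinset.card := h1.symm
    _ ≤ pvOPT.toFinset.card := Finset.card_le_card h2
    _ ≤ pvOPT.length := List.toFinset_card_le pvOPT

theorem pv_perm (o : List String) (hn : o.Nodup) (hs : o ⊆ pvOPT) :
    (o ++ pvOPT.filter (fun p => !(o.contains p))).Perm pvOPT := by
  have hOPT : pvOPT.Nodup := by decide
  have h1 : o.Perm (pvOPT.filter (fun p => o.contains p)) := by
    apply List.perm_of_nodup_nodup_toFinset_eq hn (hOPT.filter _)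
    ext x
    simp only [List.mem_toFinset, List.mem_filter]
    constructor
    · intro hx
      exact ⟨hs hx, by simpa using hx⟩
    · intro hx
      simpa using hx.2
  exact (h1.append_right _).trans (List.filter_append_perm _ _)

theorem pv_pairwise (o : List String) (hn : o.Nodup) (hs : o ⊆ pvOPT) :
    (o ++ pvOPT.filter (fun p => !(o.contains p))).Pairwise
      (fun a b => pvKey o a < pvKey o b) := by
  rw [List.pairwise_append]
  refine ⟨?_, ?_, ?_⟩
  · exact pv_pairwise_rank o 0 _ _ hn
  · -- the absent plugins keep canonical order: key is length + canonical index
    have hbase : pvOPT.Pairwise (fun a b =>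
        (pvOPT.length : Int) + (((PySem.List.index? pvOPT a).getD 0 : Nat) : Int)
          < (pvOPT.length : Int) + (((PySem.List.index? pvOPT b).getD 0 : Nat) : Int)) := by
      decide
    have hsub := hbase.sublist (@List.filter_sublist String (fun p => !(o.contains p)) pvOPT)
    refine List.Pairwise.imp_of_mem ?_ hsub
    intro a b ha hb hr
    have ha' : a ∉ o := by
      have := (List.mem_filter.mp ha).2
      simpa using this
    have hb' : b ∉ o := by
      have := (List.mem_filter.mp hb).2
      simpa using this
    rw [pv_key_not_mem o a ha', pv_key_not_mem o b hb']
    exact hr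
  · intro a ha b hb
    obtain ⟨k, hk, h0, h1⟩ := pv_get?_mem o 0 a ha
    have hka : pvKey o a = k := by
      simp [pvKey, PySem.Dict.getD, hk]
    have hb' : b ∉ o := by
      have := (List.mem_filter.mp hb).2
      simpa using this
    rw [hka, pv_key_not_mem o b hb']
    have hle := pv_length_le o hn hs
    have : ((0 : Nat) : Int) ≤ (((PySem.List.index? pvOPT b).getD 0 : Nat) : Int) := by
      exact_mod_cast Nat.zero_le _
    omega

-- the synchronised loop invariant: from a common collected list o, A's loop state stays
-- (o', o') and B's rank dict stays the rank table of the same o'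
theorem pv_loop_sync (pol : List String) : ∀ (o : List String), o.Nodup → o ⊆ pvOPT →
    ∃ o', pol.foldl pvStepA (o, o) = (o', o')
      ∧ pol.foldl pvStepB (PySem.Dict.mk (pvRankPairs o 0)) = PySem.Dict.mk (pvRankPairs o' 0)
      ∧ o'.Nodup ∧ o' ⊆ pvOPT := by
  induction pol with
  | nil => exact fun o hn hs => ⟨o, rfl, rfl, hn, hs⟩
  | cons raw rest ih =>
      intro o hn hs
      by_cases hc : pvOPT.contains (pvClean raw) = true ∧ pvClean raw ∉ o
      · obtain ⟨h1, h2⟩ := hc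
        have hoc : o.contains (pvClean raw) = false := by simpa using h2
        have hmem : pvClean raw ∈ pvOPT := by simpa using h1
        have hsA : pvStepA (o, o) raw = (o ++ [pvClean raw], o ++ [pvClean raw]) := by
          simp only [pvStepA]
          rw [if_pos (by simp only [Bool.and_eq_true, Bool.not_eq_true', PySem.Set.contains_eq_listContains]; exact ⟨h1, hoc⟩)]
          simp [PySem.Set.add, h2]
        have hrc : (PySem.Dict.mk (pvRankPairs o 0)).contains (pvClean raw) = false := by
          rw [pv_contains_rank]
          exact hoc
        have hsB : pvStepB (PySem.Dict.mk (pvRankPairs o 0)) raw =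
            PySem.Dict.mk (pvRankPairs (o ++ [pvClean raw]) 0) := by
          simp only [pvStepB]
          rw [if_pos (by simp only [Bool.and_eq_true, Bool.not_eq_true']; exact ⟨h1, hrc⟩), pv_size_rank, pv_insert_rank o _ h2]
        obtain ⟨o', hA, hB, hn', hs'⟩ := ih (o ++ [pvClean raw])
          (by
            exact List.nodup_append.mpr ⟨hn, List.nodup_singleton _, fun a ha b hb => by
              simp only [List.mem_singleton] at hb
              subst hb
              exact fun e => h2 (e ▸ ha)⟩)
          (by intro x hx
              rcases List.mem_append.mp hx with h | h
              · exact hs h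
              · simp only [List.mem_singleton] at h
                subst h
                simpa using h1)
        exact ⟨o', by simpa [List.foldl_cons, hsA] using hA,
               by simpa [List.foldl_cons, hsB] using hB, hn', hs'⟩
      · have himp : pvClean raw ∈ pvOPT → pvClean raw ∈ o := fun hm => by
          by_contra hno
          exact hc ⟨by simpa using hm, hno⟩
        have hsA : pvStepA (o, o) raw = (o, o) := by
          simp only [pvStepA]
          rw [if_neg (by simp only [PySem.Set.contains_eq_listContains]; simp; exact himp)]
        have hsB : pvStepB (PySem.Dict.mk (pvRankPairs o 0)) raw =
            PySem.Dict.mk (pvRankPairs o 0) := by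
          simp only [pvStepB]
          rw [if_neg (by simp only [pv_contains_rank]; simp; exact himp)]
        obtain ⟨o', hA, hB, hn', hs'⟩ := ih o hn hs
        exact ⟨o', by simpa [List.foldl_cons, hsA] using hA,
               by simpa [List.foldl_cons, hsB] using hB, hn', hs'⟩

theorem pv_final (o : List String) (hn : o.Nodup) (hs : o ⊆ pvOPT) :
    pvOPT.foldl
      (fun ordered plugin =>
        if !(PySem.Set.contains o plugin) then ordered ++ [plugin] else ordered) o
    = PySem.List.sorted pvOPT (fun p => pvKey o p) false := by
  have hfold : pvOPT.foldl
      (fun ordered plugin =>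
        if !(PySem.Set.contains o plugin) then ordered ++ [plugin] else ordered) o
      = o ++ pvOPT.filter (fun p => !(o.contains p)) := by
    simp only [PySem.Set.contains_eq_listContains]
    exact PySem.List.foldl_append_if_eq_filter _ _ _
  rw [hfold]
  exact (PySem.List.sorted_eq_of_perm_of_pairwise_lt _ _ (fun p => pvKey o p)
    (pv_perm o hn hs) (pv_pairwise o hn hs)).symm

-- ===== VERDICT (by name: the statement is the Claim_ definition above) =====
theorem ordered_optional_plugins_py_spec : Claim_equal_ordered_optional_plugins_py := by
  intro policy_order _
  unfold Spec_ordered_optional_plugins_py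
  obtain ⟨o', hA, hB, hn, hs⟩ := pv_loop_sync policy_order [] (by simp) (by simp)
  have hA' : policy_order.foldl pvStepA ([], PySem.Set.empty) = (o', o') := hA
  have hB' : policy_order.foldl pvStepB PySem.Dict.empty = PySem.Dict.mk (pvRankPairs o' 0) := hB
  have hfin := pv_final o' hn hs
  simp only [pvKey] at hfin
  simp only [ordered_optional_plugins_py, ordered_optional_plugins_py_alt, hA', hB']
  exact hfin
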